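-- pv_equiv track=rewrite | github.com/rahulswimmer/scalar_assignments_hw | patternprinting2.py | solve
-- ===== SOURCE A (Python) =====
-- def solve(A):
--     arr=[]
--     for i in range(1,A+1):
--         col=[]
--         for _ in range(A-i):
--             col.append(0)
--         for j in range(i,0,-1):
--             col.append(j)
--         arr.append(col)
--
--     return arr
-- ===== SOURCE B (Python) =====
-- def solve(A):
--     # Incremental: keep one row, each step lights up one more cell from the right.
--     # After step i the row has i at position A-i; the rest is unchanged from the
--     # previous step (zeros on the left, the earlier countdown values on the right).
--     row = [0] * A
--     out = []
--     for i in range(1, A + 1):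
--         row[A - i] = i
--         out.append(row[:])
--     return out
-- ===== Notes on version B (the rewrite author's own statement) =====
-- stated objective: alternative
-- what changed: Instead of rebuilding each row from scratch with two inner fill loops (append zeros, then append a descending countdown), B maintains a single mutable row of A zeros and per step writes exactly one cell (row[A-i]=i), snapshotting a slice copy of the row.
import Mathlib
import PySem

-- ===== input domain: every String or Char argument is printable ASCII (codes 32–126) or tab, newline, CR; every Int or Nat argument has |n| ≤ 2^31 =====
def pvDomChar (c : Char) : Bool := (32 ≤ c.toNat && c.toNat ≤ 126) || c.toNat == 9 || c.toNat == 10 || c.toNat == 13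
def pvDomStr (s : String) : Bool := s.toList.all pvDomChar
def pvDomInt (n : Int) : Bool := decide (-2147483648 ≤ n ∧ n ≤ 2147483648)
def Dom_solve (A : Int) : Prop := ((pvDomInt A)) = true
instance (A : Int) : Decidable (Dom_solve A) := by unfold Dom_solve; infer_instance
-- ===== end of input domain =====

-- B maintains one mutable row and writes a single cell per step (row[A-i]=i), snapshotting a copy,
-- instead of rebuilding each row with two fill loops; objective: alternative decomposition.

-- ===== PORT A =====
def solve (A : Int) : List (List Int) :=
  (PySem.List.pyRange 1 (A + 1) 1).foldl (fun arr i =>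
    let col := (PySem.List.pyRange 0 (A - i) 1).foldl (fun c _ => c ++ [(0 : Int)]) []
    let col := (PySem.List.pyRange i 0 (-1)).foldl (fun c j => c ++ [j]) col
    arr ++ [col]) []

-- ===== PORT B =====
-- row[A - i] = i : inside the loop 0 ≤ A - i < row.length, so List.set with .toNat is exact here
def solve_alt (A : Int) : List (List Int) :=
  (((PySem.List.pyRange 1 (A + 1) 1).foldl (fun (st : List Int × List (List Int)) i =>
      let row := st.1.set (A - i).toNat i
      (row, st.2 ++ [row]))
    (List.replicate A.toNat 0, []))).2

-- ===== PRECONDITION & SPEC =====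
def Spec_solve (A : Int) (out : List (List Int)) : Prop := out = solve_alt A
instance (A : Int) (out : List (List Int)) : Decidable (Spec_solve A out) := by unfold Spec_solve; infer_instance

-- ===== CLAIM (what is proved, stated in full; the proofs are below) =====
def Claim_equal_solve : Prop := ∀ (A : Int), Dom_solve A → Spec_solve A (solve A)

-- ===== LEMMAS AND PROOFS =====

-- closed form: row i of the grid has A-k at column k when i+k ≥ A, else 0
def closedRow (A i : Int) : List Int :=
  (PySem.List.pyRange 0 A 1).map (fun k => if A ≤ i + k then A - k else 0)

lemma length_closedRow (A i : Int) : (closedRow A i).length = A.toNat := by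
  simp [closedRow, PySem.List.length_pyRange_one]

-- A's row (zeros fill then countdown) equals the closed form, for 1 ≤ i ≤ A
lemma row_eq (A i : Int) (h1 : 1 ≤ i) (h2 : i ≤ A) :
    (PySem.List.pyRange i 0 (-1)).foldl (fun c j => c ++ [j])
      ((PySem.List.pyRange 0 (A - i) 1).foldl (fun c _ => c ++ [(0 : Int)]) [])
    = closedRow A i := by
  unfold closedRow
  rw [PySem.List.foldl_append_singleton_eq_map, PySem.List.foldl_append_singleton_eq_map]
  rw [PySem.List.pyRange_one_append 0 (A - i) A (by omega) (by omega), List.map_append]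
  congr 1
  · exact (List.map_congr_left fun k hk => by
      have := (PySem.List.mem_pyRange_one).mp hk
      simp [show ¬ A ≤ i + k by omega]).symm
  · rw [PySem.List.pyRange_neg_one, PySem.List.pyRange_one]
    rw [List.map_map, List.map_map]
    have : (i - 0).toNat = (A - (A - i)).toNat := by omega
    rw [this]
    refine List.map_congr_left fun k hk => ?_
    have hk' : (k : Int) < A - (A - i) := by
      have := List.mem_range.mp hk; omega
    simp only [Function.comp]
    rw [if_pos (by omega)]
    omega

-- setting cell A-(i+1) of closedRow A i to i+1 yields closedRow A (i+1), for 0 ≤ i < A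
lemma getElem_closedRow (A i : Int) (k : Nat) (hk : k < (closedRow A i).length) :
    (closedRow A i)[k] = if A ≤ i + k then A - k else 0 := by
  unfold closedRow at hk ⊢
  simp [List.getElem_map, PySem.List.getElem_pyRange_one]

lemma set_closedRow (A i : Int) (h0 : 0 ≤ i) (h2 : i < A) :
    (closedRow A i).set (A - (i + 1)).toNat (i + 1) = closedRow A (i + 1) := by
  apply List.ext_getElem
  · simp [length_closedRow]
  · intro k hk1 hk2
    simp only [length_closedRow] at hk2
    have hkA : (k : Int) < A := by omega
    rw [List.getElem_set, getElem_closedRow, getElem_closedRow]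
    split_ifs <;> omega

-- B's fold invariant, over the prefix range 1..m
lemma alt_invariant (A : Int) (m : Nat) (hm : (m : Int) ≤ A) :
    ((PySem.List.pyRange 1 ((m : Int) + 1) 1).foldl (fun (st : List Int × List (List Int)) i =>
        let row := st.1.set (A - i).toNat i
        (row, st.2 ++ [row]))
      (List.replicate A.toNat 0, []))
    = (closedRow A m, (PySem.List.pyRange 1 ((m : Int) + 1) 1).map (closedRow A)) := by
  induction m with
  | zero =>
    rw [PySem.List.pyRange_one_eq_nil (by omega)]
    simp only [List.foldl_nil, List.map_nil]
    congr 1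
    apply List.ext_getElem
    · simp [length_closedRow]
    · intro k hk1 hk2
      simp only [List.length_replicate] at hk1
      rw [getElem_closedRow]
      simp only [List.getElem_replicate]
      rw [if_neg (by omega)]
  | succ n ih =>
    have hn : (n : Int) ≤ A := by push_cast at hm; omega
    have hsplit : PySem.List.pyRange 1 (((n : Nat) + 1 : Int) + 1) 1
        = PySem.List.pyRange 1 ((n : Int) + 1) 1 ++ [(n : Int) + 1] := by
      rw [PySem.List.pyRange_one_succ_right (by omega)]
    push_cast at hsplit ⊢
    rw [hsplit, List.foldl_append, List.map_append, ih hn]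
    simp only [List.foldl_cons, List.foldl_nil, List.map_cons, List.map_nil]
    have hset : (closedRow A n).set (A - ((n : Int) + 1)).toNat ((n : Int) + 1)
        = closedRow A ((n : Int) + 1) :=
      set_closedRow A n (by omega) (by push_cast at hm; omega)
    rw [hset]

theorem solve_spec : Claim_equal_solve := by
  intro A _
  unfold Spec_solve solve solve_alt
  rw [PySem.List.foldl_append_singleton_eq_map]
  simp only [List.nil_append]
  by_cases hA : 0 ≤ A
  · obtain ⟨m, rfl⟩ := Int.eq_ofNat_of_zero_le hA
    rw [alt_invariant m m (by omega)]
    exact List.map_congr_left fun i hi => by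
      have := (PySem.List.mem_pyRange_one).mp hi
      exact row_eq _ i (by omega) (by omega)
  · rw [PySem.List.pyRange_one_eq_nil (by omega)]
    simp
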